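-- pv_equiv track=rewrite | github.com/neuspell/neuspell | applications/Adversarial-Misspellings/attacks.py | drop_one_attack_deprecated
-- ===== SOURCE A (Python) =====
-- import string
--
-- punctuations = string.punctuation +  ' '
--
-- def drop_one_attack_deprecated(line):
--     for i in range(1, len(line) - 1):
--         if line[i] in punctuations or line[i-1] in punctuations \
--         or line[i+1] in punctuations:
--             # first or last character of a word
--             continue
--
--         # drop the ith character
--         new_line = line[:i] + line[i+1:]
--         if len(new_line.split()) != len(line.split()):
--             # probably dropped a single char word
--             continue
--         yield new_line
-- ===== SOURCE B (Python) =====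
-- import string
--
-- # One pass over sliding (prev, cur, next) windows from zipping the line with its
-- # shifts; the per-candidate split()/recount of A is replaced by a constant-time
-- # whitespace pattern check on the window (dropping cur changes the token count
-- # exactly when cur is a lone separator or a lone one-char word).
-- def drop_one_attack_deprecated(line):
--     punct = set(string.punctuation) | {' '}
--     for i, (a, b, c) in enumerate(zip(line, line[1:], line[2:])):
--         if a in punct or b in punct or c in punct:
--             continue
--         if b.isspace():
--             if not (a.isspace() or c.isspace()):
--                 # dropping a lone separator would merge two words
--                 continue
--         else:
--             if a.isspace() and c.isspace():
--                 # would drop a single-char word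
--                 continue
--         yield line[:i + 1] + line[i + 2:]
-- ===== Notes on version B (the rewrite author's own statement) =====
-- stated objective: alternative
-- what changed: Instead of indexing i over range(1, len-1) and re-splitting the whole line twice per candidate to compare token counts, B makes one pass over sliding (prev, cur, next) windows obtained by zipping the line with its shifts and decides each candidate with a constant-time whitespace-pattern check on the window (dropping cur changes the token count exactly when cur is a lone separator or a lone one-char word; proved as the pvGuard lemma).
import Mathlib
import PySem

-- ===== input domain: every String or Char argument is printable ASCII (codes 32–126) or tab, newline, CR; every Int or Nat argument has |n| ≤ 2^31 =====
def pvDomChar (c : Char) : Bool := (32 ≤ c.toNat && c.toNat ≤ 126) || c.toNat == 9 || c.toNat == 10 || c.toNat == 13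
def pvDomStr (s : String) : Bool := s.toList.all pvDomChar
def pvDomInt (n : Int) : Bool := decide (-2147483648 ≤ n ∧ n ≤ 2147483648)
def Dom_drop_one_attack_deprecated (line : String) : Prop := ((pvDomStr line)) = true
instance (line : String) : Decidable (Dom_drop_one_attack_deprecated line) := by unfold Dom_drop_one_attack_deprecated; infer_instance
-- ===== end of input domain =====

-- B replaces A's per-candidate split()-and-recount (an inner pass over the whole line) by a
-- one-pass scan over sliding (prev, cur, next) windows with a constant-time whitespace-pattern
-- check per candidate; objective: alternative.


-- string.punctuation + ' '
def pvPunct : List Char := "!\"#$%&'()*+,-./:;<=>?@[\\]^_`{|}~ ".toList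

-- ===== PORT A =====
-- 'line[i] in punctuations' tests a single-character string: exactly char membership.
def drop_one_attack_deprecated (line : String) : List String :=
  (PySem.List.pyRange 1 ((line.toList.length : Int) - 1)).foldl
    (fun acc i =>
      match PySem.List.pyGet? line.toList i, PySem.List.pyGet? line.toList (i - 1), PySem.List.pyGet? line.toList (i + 1) with
      | some c0, some cm, some cp =>
        if pvPunct.contains c0 || pvPunct.contains cm || pvPunct.contains cp then acc
        else
          let new_line := PySem.List.slice line.toList none (some i) ++ PySem.List.slice line.toList (some (i + 1)) none
          if (PySem.Chars.split₀ new_line).length ≠ (PySem.Chars.split₀ line.toList).length then acc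
          else acc ++ [String.mk new_line]
      | _, _, _ => acc  -- unreachable: every i in range(1, len-1) indexes in bounds
      ) []

-- ===== PORT B =====
def drop_one_attack_deprecated_alt (line : String) : List String :=
  (PySem.List.enumerate
      (line.toList.zip ((PySem.List.slice line.toList (some 1) none).zip
        (PySem.List.slice line.toList (some 2) none)))).foldl
    (fun out x =>
      let i := x.1
      let a := x.2.1
      let b := x.2.2.1
      let c := x.2.2.2
      if pvPunct.contains a || pvPunct.contains b || pvPunct.contains c then out
      else if PySem.Chars.isspace b then
        if !(PySem.Chars.isspace a || PySem.Chars.isspace c) then out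
        else out ++ [String.mk (PySem.List.slice line.toList none (some (i + 1)) ++ PySem.List.slice line.toList (some (i + 2)) none)]
      else
        if PySem.Chars.isspace a && PySem.Chars.isspace c then out
        else out ++ [String.mk (PySem.List.slice line.toList none (some (i + 1)) ++ PySem.List.slice line.toList (some (i + 2)) none)]
      ) []

-- ===== PRECONDITION & SPEC =====
def Spec_drop_one_attack_deprecated (line : String) (out : List String) : Prop := out = drop_one_attack_deprecated_alt line
instance (line : String) (out : List String) : Decidable (Spec_drop_one_attack_deprecated line out) := by unfold Spec_drop_one_attack_deprecated; infer_instance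

-- ===== CLAIM (what is proved, stated in full; the proofs are below) =====
def Claim_equal_drop_one_attack_deprecated : Prop := ∀ (line : String), Dom_drop_one_attack_deprecated line → Spec_drop_one_attack_deprecated line (drop_one_attack_deprecated line)

-- ===== LEMMAS AND PROOFS =====

-- token counter: pvToks s e = number of whitespace-separated tokens of s, given that a
-- token is currently open (e = true) or not
def pvToks : List Char → Bool → Nat
  | [], e => if e then 1 else 0
  | ch :: r, e => if PySem.Chars.isspace ch then (if e then 1 else 0) + pvToks r false else pvToks r true

-- dropping b out of the window a·b·c keeps the token count iff this holds
def pvKeep (a b c : Char) : Bool :=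
  if PySem.Chars.isspace b then (PySem.Chars.isspace a || PySem.Chars.isspace c)
  else !(PySem.Chars.isspace a && PySem.Chars.isspace c)

def pvCond (l : List Char) (k : Nat) : Bool :=
  !(pvPunct.contains (l.getD (k+1) ' ') || pvPunct.contains (l.getD k ' ') || pvPunct.contains (l.getD (k+2) ' '))
  && pvKeep (l.getD k ' ') (l.getD (k+1) ' ') (l.getD (k+2) ' ')

def pvDrop (l : List Char) (k : Nat) : String := String.mk (l.take (k+1) ++ l.drop (k+2))

def pvCanon (l : List Char) : List String := ((List.range (l.length - 2)).filter (pvCond l)).map (pvDrop l)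

theorem pvToks_go (s : List Char) : ∀ (cur : List Char) (acc : List (List Char)),
    (PySem.Chars.split₀.go s cur acc).length = acc.length + pvToks s (!cur.isEmpty) := by
  induction s with
  | nil =>
    intro cur acc
    simp only [PySem.Chars.split₀.go, pvToks]
    cases cur <;> simp
  | cons c rest ih =>
    intro cur acc
    simp only [PySem.Chars.split₀.go, pvToks]
    by_cases hs : PySem.Chars.isspace c
    · cases cur <;> simp [hs, ih] <;> omega
    · cases cur <;> simp [hs, ih]

theorem pvSplit₀_length (s : List Char) : (PySem.Chars.split₀ s).length = pvToks s false := by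
  simpa using pvToks_go s [] []

theorem pvToks_window (a b c : Char) (y : List Char) (e : Bool) :
    pvToks (a :: b :: c :: y) e = (if pvKeep a b c then 0 else 1) + pvToks (a :: c :: y) e := by
  by_cases ha : PySem.Chars.isspace a <;> by_cases hb : PySem.Chars.isspace b <;>
    by_cases hc : PySem.Chars.isspace c <;> simp [pvToks, pvKeep, ha, hb, hc] <;> omega

theorem pvToks_append (x u v : List Char) (d : Nat)
    (h : ∀ e, pvToks u e = d + pvToks v e) : ∀ e, pvToks (x ++ u) e = d + pvToks (x ++ v) e := by
  induction x with
  | nil => simpa using h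
  | cons ch x' ih =>
    intro e
    by_cases hs : PySem.Chars.isspace ch <;> simp [pvToks, hs, ih] <;> omega

theorem pvGuard (l : List Char) (k : Nat) (h : k + 2 < l.length) :
    (PySem.Chars.split₀ l).length =
      (if pvKeep (l.getD k ' ') (l.getD (k+1) ' ') (l.getD (k+2) ' ') then 0 else 1) +
      (PySem.Chars.split₀ (l.take (k+1) ++ l.drop (k+2))).length := by
  have hk : k < l.length := by omega
  have hk1 : k + 1 < l.length := by omega
  have ha : l.getD k ' ' = l[k] := List.getD_eq_getElem l ' ' hk
  have hb : l.getD (k+1) ' ' = l[k+1] := List.getD_eq_getElem l ' ' hk1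
  have hc : l.getD (k+2) ' ' = l[k+2] := List.getD_eq_getElem l ' ' h
  have hdec : l = l.take k ++ l[k] :: l[k+1] :: l[k+2] :: l.drop (k+3) := by
    conv_lhs => rw [← List.take_append_drop k l]
    rw [List.drop_eq_getElem_cons hk, List.drop_eq_getElem_cons hk1, List.drop_eq_getElem_cons h]
  have ht : l.take (k+1) = l.take k ++ [l[k]] := by
    rw [List.take_add_one, List.getElem?_eq_getElem hk]; rfl
  have hnew : l.take (k+1) ++ l.drop (k+2) = l.take k ++ l[k] :: l[k+2] :: l.drop (k+3) := by
    rw [ht, List.drop_eq_getElem_cons h]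
    simp only [List.append_assoc, List.cons_append, List.nil_append]
  rw [pvSplit₀_length, pvSplit₀_length, hnew, ha, hb, hc]
  conv_lhs => rw [hdec]
  exact pvToks_append (l.take k) _ _ _
    (fun e => pvToks_window l[k] l[k+1] l[k+2] (l.drop (k+3)) e) false

theorem pvRange_base (m : Nat) (a : Int) :
    PySem.List.pyRange a (a + m) = (List.range m).map (fun (k : Nat) => a + (k : Int)) := by
  induction m with
  | zero =>
    have : (PySem.List.pyRange a (a + 0)).length = 0 := by
      rw [PySem.List.length_pyRange_one]; omega
    simpa using List.eq_nil_of_length_eq_zero this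
  | succ m ih =>
    have h1 : a ≤ a + (m : Int) := by omega
    have h2 : a + (m : Int) ≤ a + ((m : Nat) + 1 : Nat) := by push_cast; omega
    rw [PySem.List.pyRange_one_append a (a + m) (a + ((m : Nat) + 1 : Nat)) h1 h2, ih]
    have h3 : a + (m : Int) < a + ((m : Nat) + 1 : Nat) := by push_cast; omega
    rw [PySem.List.pyRange_one_cons h3]
    have h4 : (PySem.List.pyRange (a + (m : Int) + 1) (a + ((m : Nat) + 1 : Nat))).length = 0 := by
      rw [PySem.List.length_pyRange_one]; push_cast; omega
    rw [List.eq_nil_of_length_eq_zero h4, List.range_succ]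
    simp

theorem pvRange_shift (n : Nat) :
    PySem.List.pyRange 1 ((n : Int) - 1) = (List.range (n - 2)).map (fun (k : Nat) => ((k : Int) + 1)) := by
  rcases Nat.lt_or_ge n 2 with hn | hn
  · have h0 : (PySem.List.pyRange 1 ((n : Int) - 1)).length = 0 := by
      rw [PySem.List.length_pyRange_one]; omega
    rw [List.eq_nil_of_length_eq_zero h0]
    interval_cases n <;> simp
  · have h : (n : Int) - 1 = 1 + ((n - 2 : Nat) : Int) := by
      have : ((n - 2 : Nat) : Int) = (n : Int) - 2 := by omega
      omega
    rw [h, pvRange_base (n - 2) 1]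
    exact List.map_congr_left (fun k _ => by omega)

theorem pvEnum (l : List Char) :
    PySem.List.enumerate (l.zip ((l.drop 1).zip (l.drop 2))) =
      (List.range (l.length - 2)).map
        (fun (k : Nat) => ((k : Int), (l.getD k ' ', (l.getD (k+1) ' ', l.getD (k+2) ' ')))) := by
  apply List.ext_getElem
  · simp [PySem.List.length_enumerate]; omega
  · intro i h1 h2
    have hlen : (l.zip ((l.drop 1).zip (l.drop 2))).length = l.length - 2 := by
      simp; omega
    have hi : i < l.length - 2 := by
      rw [PySem.List.length_enumerate, hlen] at h1; exact h1
    have hz : i < (l.zip ((l.drop 1).zip (l.drop 2))).length := by omega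
    rw [PySem.List.getElem_enumerate _ _ i (by simpa [PySem.List.length_enumerate] using hz)]
    have h01 : i < (l.drop 1).length := by simp; omega
    have h02 : i < (l.drop 2).length := by simp; omega
    simp [List.getElem_zip, List.getElem_drop,
      List.getElem?_eq_getElem (show i < l.length by omega),
      List.getElem?_eq_getElem (show i + 1 < l.length by omega),
      List.getElem?_eq_getElem (show i + 2 < l.length by omega), List.getD]
    congr 1
    omega

theorem pvA_eq (line : String) : drop_one_attack_deprecated line = pvCanon line.toList := by
  unfold drop_one_attack_deprecated pvCanon
  set l := line.toList with hl
  rw [pvRange_shift l.length, List.foldl_map]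
  rw [PySem.List.foldl_congr_mem _ _
    (fun acc k => if pvCond l k then acc ++ [pvDrop l k] else acc) []
    (by
      intro acc k hk
      have hk2 : k + 2 < l.length := by
        have := List.mem_range.mp hk; omega
      have e1 : ((k : Int) + 1) = ((k + 1 : Nat) : Int) := by push_cast; ring
      have e0 : ((k : Int) + 1 - 1) = ((k : Nat) : Int) := by push_cast; ring
      have e2 : ((k : Int) + 1 + 1) = ((k + 2 : Nat) : Int) := by push_cast; ring
      rw [e0, e2, e1, PySem.List.pyGet?_natCast, PySem.List.pyGet?_natCast,
        PySem.List.pyGet?_natCast,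
        List.getElem?_eq_getElem (by omega : k + 1 < l.length),
        List.getElem?_eq_getElem (by omega : k < l.length),
        List.getElem?_eq_getElem hk2,
        PySem.List.slice_to_natCast, PySem.List.slice_from_natCast]
      simp only []
      have ga : l.getD k ' ' = l[k] := List.getD_eq_getElem l ' ' (by omega)
      have gb : l.getD (k+1) ' ' = l[k+1] := List.getD_eq_getElem l ' ' (by omega)
      have gc : l.getD (k+2) ' ' = l[k+2] := List.getD_eq_getElem l ' ' hk2
      have q0 : l[k]? = some l[k] := List.getElem?_eq_getElem (by omega)
      have q1 : l[k+1]? = some l[k+1] := List.getElem?_eq_getElem (by omega)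
      have q2 : l[k+2]? = some l[k+2] := List.getElem?_eq_getElem hk2
      have hguard := pvGuard l k hk2
      rw [ga, gb, gc] at hguard
      by_cases hkeep : pvKeep l[k] l[k+1] l[k+2] = true
      · rw [hkeep, if_pos rfl, Nat.zero_add] at hguard
        have hg : (PySem.Chars.split₀ (List.take (k+1) l ++ List.drop (k+2) l)).length =
            (PySem.Chars.split₀ l).length := hguard.symm
        by_cases hp1 : l[k+1] ∈ pvPunct <;> by_cases hp0 : l[k] ∈ pvPunct <;>
          by_cases hp2 : l[k+2] ∈ pvPunct <;>
          simp [pvCond, pvDrop, ga, gb, gc, q0, q1, q2, hp1, hp0, hp2, hkeep, hg]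
      · rw [Bool.not_eq_true] at hkeep
        rw [hkeep] at hguard
        simp only [Bool.false_eq_true, if_false] at hguard
        have hg : (PySem.Chars.split₀ (List.take (k+1) l ++ List.drop (k+2) l)).length ≠
            (PySem.Chars.split₀ l).length := by omega
        by_cases hp1 : l[k+1] ∈ pvPunct <;> by_cases hp0 : l[k] ∈ pvPunct <;>
          by_cases hp2 : l[k+2] ∈ pvPunct <;>
          simp [pvCond, pvDrop, ga, gb, gc, q0, q1, q2, hp1, hp0, hp2, hkeep, hg])]
  rw [PySem.List.foldl_append_if]
  simp

theorem pvB_eq (line : String) : drop_one_attack_deprecated_alt line = pvCanon line.toList := by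
  unfold drop_one_attack_deprecated_alt pvCanon
  set l := line.toList with hl
  rw [show PySem.List.slice l (some 1) none = l.drop 1 from PySem.List.slice_from_natCast l 1,
      show PySem.List.slice l (some 2) none = l.drop 2 from PySem.List.slice_from_natCast l 2,
      pvEnum l, List.foldl_map]
  rw [PySem.List.foldl_congr_mem _ _
    (fun acc k => if pvCond l k then acc ++ [pvDrop l k] else acc) []
    (by
      intro acc k hk
      simp only []
      have e1 : ((k : Int) + 1) = ((k + 1 : Nat) : Int) := by push_cast; ring
      have e2 : ((k : Int) + 2) = ((k + 2 : Nat) : Int) := by push_cast; ring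
      rw [e1, e2, PySem.List.slice_to_natCast, PySem.List.slice_from_natCast]
      unfold pvCond pvDrop
      set a := l.getD k ' '
      set b := l.getD (k+1) ' '
      set c := l.getD (k+2) ' '
      by_cases pa : a ∈ pvPunct <;> by_cases pb : b ∈ pvPunct <;>
        by_cases pc : c ∈ pvPunct <;>
        by_cases sa : PySem.Chars.isspace a = true <;> by_cases sb : PySem.Chars.isspace b = true <;>
        by_cases sc : PySem.Chars.isspace c = true <;>
        simp [pvKeep, pa, pb, pc, sa, sb, sc])]
  rw [PySem.List.foldl_append_if]
  simp

-- ===== VERDICT (by name: the statement is the Claim_ definition above) =====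
theorem drop_one_attack_deprecated_spec : Claim_equal_drop_one_attack_deprecated := by
  intro line _
  unfold Spec_drop_one_attack_deprecated
  rw [pvA_eq, pvB_eq]
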